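-- pv_equiv track=rewrite | github.com/macdonald34/Codility | functionsolution.py | solution
-- ===== SOURCE A (Python) =====
-- def solution(A, D):
--     #loop through A to access one transaction
--     acc_balance = 0
--     no_monthly_transactions = {}
--     value_monthly_transactons = {}
--     #add each transaction to acc_balance
--     for index, transaction in enumerate(A):
--         acc_balance += transaction
--
--         if transaction < 0:
--             #display date in YYYYMMDD
--             date = D[index].split('-')
--             #define a variable month which is a slice of the date
--             month = date[1]
--             #create a dictionary containing the frequency of each month's card payments
--             if month in no_monthly_transactions:
--                 no_monthly_transactions[month] += 1
--             else:
--                 no_monthly_transactions[month] = 1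
--
--             #create a dictionary containing the value of card payments per month
--             if month in value_monthly_transactons:
--                 value_monthly_transactons[month] += transaction
--             else:
--                 value_monthly_transactons[month] = transaction
--
--     #calculate no of months that will be excluded from fee
--     excluded_months = 0
--     #count a month as excluded if it has more than three payments with a total value less than -100, which basically is greater than 100 since payments are negative
--     for key,value in no_monthly_transactions.items():
--         if value >= 3 and value_monthly_transactons[key] <= -100:
--             excluded_months += 1
--
--     #assign a 5 to a variable for easy maintenance incase monthly fee changes
--     monthly_fee = 5
--     #check no of months fee charged
--     months_fee_charged = 12 - excluded_months
--     #calculate total fees charged in that year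
--     total_fee = monthly_fee * months_fee_charged
--
--     #subtract total fees charged on the account from account balance to get the final balance
--     final_balance = acc_balance - total_fee
--     print (final_balance)
--     return final_balance
-- ===== SOURCE B (Python) =====
-- def solution(A, D):
--     # stage 1: extract the negative transactions as (month, amount) pairs
--     neg = [(d.split('-')[1], a) for a, d in zip(A, D) if a < 0]
--     # stage 2: for the FIRST occurrence of each month, rescan neg for that
--     # month's payments and decide whether the month is fee-exempt
--     excluded = 0
--     seen = []
--     for m, _ in neg:
--         if m not in seen:
--             seen.append(m)
--             amts = [a for m2, a in neg if m2 == m]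
--             if len(amts) >= 3 and sum(amts) <= -100:
--                 excluded += 1
--     final_balance = sum(A) - 5 * (12 - excluded)
--     print(final_balance)
--     return final_balance
-- ===== Notes on version B (the rewrite author's own statement) =====
-- stated objective: alternative
-- what changed: No dictionaries and no running per-month accumulators: B stages the work as a closed-form sum(A) plus a list of (month, amount) pairs of the negatives, then at each month's first occurrence rescans that list to collect the month's payments and test len/sum once, instead of A's single pass maintaining two month-keyed counter dicts.
import Mathlib
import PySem

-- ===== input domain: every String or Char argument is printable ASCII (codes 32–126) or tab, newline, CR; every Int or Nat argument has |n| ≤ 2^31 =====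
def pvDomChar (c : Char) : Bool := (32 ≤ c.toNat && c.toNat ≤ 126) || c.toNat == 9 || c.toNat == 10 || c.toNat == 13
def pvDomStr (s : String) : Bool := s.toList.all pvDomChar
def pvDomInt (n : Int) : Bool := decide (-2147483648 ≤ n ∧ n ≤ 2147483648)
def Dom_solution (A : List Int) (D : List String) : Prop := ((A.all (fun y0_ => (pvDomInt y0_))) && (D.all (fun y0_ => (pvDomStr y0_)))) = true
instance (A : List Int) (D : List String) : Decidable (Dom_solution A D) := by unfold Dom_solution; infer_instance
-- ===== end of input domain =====

-- B drops A's running per-month counter dicts: it stages the work as sum(A) plus a list of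
-- (month, amount) pairs of the negatives, and at each month's FIRST occurrence rescans that
-- list to collect the month's payments and test len/sum once (objective: alternative).
-- Equivalence is about the RETURN value; both Pythons also print it.

-- ===== PORT A =====
def solution (A : List Int) (D : List String) : Int :=
  let st := (PySem.List.enumerate A).foldl
    (fun (st : Int × PySem.Dict (List Char) Int × PySem.Dict (List Char) Int) (p : Int × Int) =>
      let acc_balance := st.1 + p.2
      if p.2 < 0 then
        let date := PySem.Chars.splitOn ((PySem.List.pyGet? D p.1).getD "").toList ['-']
        let month := (PySem.List.pyGet? date 1).getD []
        (acc_balance, st.2.1.modify month 0 (· + 1), st.2.2.modify month 0 (· + p.2))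
      else
        (acc_balance, st.2.1, st.2.2))
    (0, PySem.Dict.empty, PySem.Dict.empty)
  let excluded_months := st.2.1.items.foldl
    (fun e kv => if decide (3 ≤ kv.2) && decide (st.2.2.getD kv.1 0 ≤ -100) then e + 1 else e) (0 : Int)
  st.1 - 5 * (12 - excluded_months)

-- ===== PORT B =====
def solution_alt (A : List Int) (D : List String) : Int :=
  let neg := ((A.zip D).filter (fun p => decide (p.1 < 0))).map
    (fun p => ((PySem.List.pyGet? (PySem.Chars.splitOn p.2.toList ['-']) 1).getD [], p.1))
  let st := neg.foldl
    (fun (st : List (List Char) × Int) (q : List Char × Int) =>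
      if st.1.contains q.1 then st
      else
        let amts := (neg.filter (fun r => r.1 == q.1)).map (·.2)
        (st.1 ++ [q.1],
         if decide (3 ≤ (amts.length : Int)) && decide (amts.sum ≤ -100) then st.2 + 1 else st.2))
    ([], 0)
  A.sum - 5 * (12 - st.2)

-- ===== PRECONDITION & SPEC =====
-- Pre_ excludes exactly the inputs where Python A raises: a negative transaction whose index has
-- no date in D (IndexError on D[index]) or whose date contains no '-' (IndexError on date[1]).
def Pre_solution (A : List Int) (D : List String) : Prop :=
  ∀ i, i < A.length → A.getD i 0 < 0 →
    i < D.length ∧ 2 ≤ (PySem.Chars.splitOn (D.getD i "").toList ['-']).length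
instance (A : List Int) (D : List String) : Decidable (Pre_solution A D) := by unfold Pre_solution; infer_instance

def pvWitness_solution : List Int × List String :=
  ([-40, -50, -60, 7], ["2020-01-02", "2020-01-03", "2020-01-04", "x"])

def Spec_solution (A : List Int) (D : List String) (out : Int) : Prop := out = solution_alt A D
instance (A : List Int) (D : List String) (out : Int) : Decidable (Spec_solution A D out) := by unfold Spec_solution; infer_instance

-- ===== CLAIM (what is proved, stated in full; the proofs are below) =====
def Claim_equal_solution : Prop := ∀ (A : List Int) (D : List String), Dom_solution A D → Pre_solution A D → Spec_solution A D (solution A D)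

-- ===== LEMMAS AND PROOFS =====

-- the month key `s.split('-')[1]` both programs extract
def pvKey (s : String) : List Char :=
  (PySem.List.pyGet? (PySem.Chars.splitOn s.toList ['-']) 1).getD []

theorem pv_enum_cons {α : Type} (a : α) (t : List α) (s : Int) :
    PySem.List.enumerate (a :: t) s = (s, a) :: PySem.List.enumerate t (s + 1) := by
  simp [PySem.List.enumerate]

theorem pv_enum_shift {α : Type} (t : List α) (s : Int) :
    PySem.List.enumerate t (s + 1) = (PySem.List.enumerate t s).map (fun p => (p.1 + 1, p.2)) := by
  induction t generalizing s with
  | nil => simp [PySem.List.enumerate]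
  | cons x t ih => rw [pv_enum_cons, pv_enum_cons]; simp [ih (s + 1)]

theorem pv_enum_mem (xs : List Int) (s : Int) (p : Int × Int) (hp : p ∈ PySem.List.enumerate xs s) :
    ∃ j : Nat, j < xs.length ∧ p.1 = s + j ∧ p.2 = xs.getD j 0 := by
  induction xs generalizing s with
  | nil => simp [PySem.List.enumerate] at hp
  | cons x t ih =>
    rw [pv_enum_cons] at hp
    rcases List.mem_cons.mp hp with h | h
    · exact ⟨0, by simp [h]⟩
    · obtain ⟨j, hj, h1, h2⟩ := ih (s + 1) h
      exact ⟨j + 1, by simpa using hj, by push_cast; omega, by simpa using h2⟩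

theorem pv_enum_sum (A : List Int) (s b : Int) :
    (PySem.List.enumerate A s).foldl (fun b p => b + p.2) b = b + A.sum := by
  induction A generalizing s b with
  | nil => simp [PySem.List.enumerate]
  | cons a t ih => rw [pv_enum_cons]; simp [List.foldl_cons, ih]; ring

theorem pv_pyGet?_cons_succ {α : Type} (x : α) (xs : List α) (i : Int) (hi : 0 ≤ i) :
    PySem.List.pyGet? (x :: xs) (i + 1) = PySem.List.pyGet? xs i := by
  obtain ⟨n, rfl⟩ := Int.eq_ofNat_of_zero_le hi
  have h1 : ((n : Int) + 1) = ((n + 1 : Nat) : Int) := by push_cast; ring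
  rw [h1, PySem.List.pyGet?_natCast, PySem.List.pyGet?_natCast]
  simp

-- month key of the i-th transaction as A reads it
def pvKeyA (D : List String) (p : Int × Int) : List Char :=
  pvKey ((PySem.List.pyGet? D p.1).getD "")

-- the (month, amount) pairs of the negative transactions as B reads them
def pvP (A : List Int) (D : List String) : List (List Char × Int) :=
  ((A.zip D).filter (fun p => decide (p.1 < 0))).map (fun p => (pvKey p.2, p.1))

-- the negatives of A, paired with their month key, read the two ways the two programs read them
theorem pv_align (A : List Int) (D : List String)
    (h : ∀ i, i < A.length → A.getD i 0 < 0 → i < D.length) :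
    ((PySem.List.enumerate A 0).filter (fun p => decide (p.2 < 0))).map
        (fun p => (pvKeyA D p, p.2))
      = pvP A D := by
  simp only [pvKeyA, pvP]
  induction A generalizing D with
  | nil => simp [PySem.List.enumerate]
  | cons a t ih =>
    cases D with
    | nil =>
      have hall : ∀ p ∈ PySem.List.enumerate (a :: t) 0, ¬ ((fun p => decide (p.2 < 0)) p = true) := by
        intro p hp
        obtain ⟨j, hj, _, h2⟩ := pv_enum_mem _ _ _ hp
        have := h j (by simpa using hj)
        simp only [decide_eq_true_eq]
        intro hneg
        exact absurd (this (h2 ▸ hneg)) (by simp)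
      rw [List.filter_eq_nil_iff.mpr (by intro p hp; simpa using hall p hp)]
      simp
    | cons d D' =>
      rw [pv_enum_cons, pv_enum_shift]
      have hzero : PySem.List.pyGet? (d :: D') 0 = some d := by
        rw [show (0 : Int) = ((0 : Nat) : Int) by simp, PySem.List.pyGet?_natCast]; simp
      have htail : ∀ i, i < t.length → t.getD i 0 < 0 → i < D'.length := by
        intro i hi hneg
        have := h (i + 1) (by simp; omega) (by simpa using hneg)
        simp at this
        omega
      have hmap :
          ((PySem.List.enumerate t 0).filter (fun p => decide (p.2 < 0))).map
              (fun p => (pvKey ((PySem.List.pyGet? (d :: D') (p.1 + 1)).getD ""), p.2))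
            = ((PySem.List.enumerate t 0).filter (fun p => decide (p.2 < 0))).map
              (fun p => (pvKey ((PySem.List.pyGet? D' p.1).getD ""), p.2)) := by
        apply List.map_congr_left
        intro p hp
        obtain ⟨j, _, h1, _⟩ := pv_enum_mem _ _ _ (List.mem_of_mem_filter hp)
        rw [pv_pyGet?_cons_succ _ _ _ (by omega)]
      by_cases ha : a < 0
      · simp only [List.zip_cons_cons, List.filter_cons, ha, decide_true, if_true, List.map_cons,
          List.filter_map, List.map_map, hzero, Option.getD_some, List.cons.injEq]
        refine ⟨trivial, ?_⟩
        calc _ = ((PySem.List.enumerate t 0).filter (fun p => decide (p.2 < 0))).map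
                  (fun p => (pvKey ((PySem.List.pyGet? (d :: D') (p.1 + 1)).getD ""), p.2)) := by
                  simp [Function.comp_def]
          _ = _ := by rw [hmap]; exact ih D' htail
      · simp only [List.zip_cons_cons, List.filter_cons, ha, decide_false, Bool.false_eq_true,
          if_false, List.filter_map, List.map_map]
        calc _ = ((PySem.List.enumerate t 0).filter (fun p => decide (p.2 < 0))).map
                  (fun p => (pvKey ((PySem.List.pyGet? (d :: D') (p.1 + 1)).getD ""), p.2)) := by
                  simp [Function.comp_def]
          _ = _ := by rw [hmap]; exact ih D' htail

theorem pv_getD_foldl_modify_sum (l : List (List Char × Int)) (d : PySem.Dict (List Char) Int)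
    (c : List Char) :
    (l.foldl (fun d p => d.modify p.1 0 (· + p.2)) d).getD c 0
      = d.getD c 0 + ((l.filter (fun p => p.1 == c)).map (·.2)).sum := by
  induction l generalizing d with
  | nil => simp
  | cons p l ih =>
    rw [List.foldl_cons, ih]
    by_cases hc : p.1 = c
    · simp [hc, PySem.Dict.modify]
      ring
    · simp [hc, Ne.symm hc, PySem.Dict.modify, PySem.Dict.getD_insert]

theorem pv_getD_foldl_modify_count (l : List (List Char × Int)) (d : PySem.Dict (List Char) Int)
    (c : List Char) :
    (l.foldl (fun d p => d.modify p.1 0 (· + 1)) d).getD c 0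
      = d.getD c 0 + ((l.filter (fun p => p.1 == c)).length : Int) := by
  induction l generalizing d with
  | nil => simp
  | cons p l ih =>
    rw [List.foldl_cons, ih]
    by_cases hc : p.1 = c
    · simp [hc, PySem.Dict.modify]
      ring
    · simp [hc, Ne.symm hc, PySem.Dict.modify, PySem.Dict.getD_insert]

-- the months B's `seen` check lets through: first occurrences not already in `seen`
def pvNew (seen : List (List Char)) : List (List Char × Int) → List (List Char)
  | [] => []
  | q :: l => if seen.contains q.1 then pvNew seen l else q.1 :: pvNew (seen ++ [q.1]) l

-- B's seen/excluded loop, characterised: seen collects the new months, excluded counts pred on them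
theorem pv_foldB (pred : List Char → Bool) (l : List (List Char × Int))
    (seen : List (List Char)) (e : Int) :
    l.foldl (fun (st : List (List Char) × Int) (q : List Char × Int) =>
        if st.1.contains q.1 then st
        else (st.1 ++ [q.1], if pred q.1 then st.2 + 1 else st.2)) (seen, e)
      = (seen ++ pvNew seen l, e + ((pvNew seen l).countP pred : Int)) := by
  induction l generalizing seen e with
  | nil => simp [pvNew]
  | cons q l ih =>
    rw [List.foldl_cons]
    by_cases hc : seen.contains q.1 = true
    · simp only [hc, if_true, pvNew, ih]
    · simp only [hc, if_false, pvNew, Bool.false_eq_true, ih]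
      by_cases hp : pred q.1 = true <;> simp [hp, List.append_assoc] <;> omega

theorem pv_mem_pvNew (seen : List (List Char)) (l : List (List Char × Int)) (x : List Char) :
    x ∈ seen ++ pvNew seen l ↔ x ∈ seen ∨ x ∈ l.map Prod.fst := by
  induction l generalizing seen with
  | nil => simp [pvNew]
  | cons q l ih =>
    by_cases hc : q.1 ∈ seen
    · have hc' : seen.contains q.1 = true := by simpa using hc
      simp only [pvNew, hc', if_true, ih, List.map_cons, List.mem_cons]
      constructor
      · rintro (h | h)
        · exact Or.inl h
        · exact Or.inr (Or.inr h)
      · rintro (h | rfl | h)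
        · exact Or.inl h
        · exact Or.inl hc
        · exact Or.inr h
    · have hc' : seen.contains q.1 = false := by simpa using hc
      have h2 := ih (seen ++ [q.1])
      simp only [pvNew, hc', Bool.false_eq_true, if_false, List.map_cons, List.mem_cons]
      have hre : seen ++ q.1 :: pvNew (seen ++ [q.1]) l
          = (seen ++ [q.1]) ++ pvNew (seen ++ [q.1]) l := by simp
      rw [hre, h2]
      simp [or_assoc]

theorem pv_nodup_pvNew (seen : List (List Char)) (l : List (List Char × Int))
    (h : (seen).Nodup) : (seen ++ pvNew seen l).Nodup := by
  induction l generalizing seen with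
  | nil => simpa [pvNew]
  | cons q l ih =>
    by_cases hc : q.1 ∈ seen
    · have hc' : seen.contains q.1 = true := by simpa using hc
      simpa [pvNew, hc', hc] using ih seen h
    · have hc' : seen.contains q.1 = false := by simpa using hc
      have hn : (seen ++ [q.1]).Nodup := by
        rw [List.nodup_append]
        refine ⟨h, by simp, ?_⟩
        intro a ha b hb
        simp only [List.mem_singleton] at hb
        subst hb
        exact fun h2 => hc (h2 ▸ ha)
      have hr := ih (seen ++ [q.1]) hn
      simpa [pvNew, hc', hc, List.append_assoc] using hr

theorem pv_main (A : List Int) (D : List String)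
    (h : ∀ i, i < A.length → A.getD i 0 < 0 → i < D.length) :
    solution A D = solution_alt A D := by
  simp only [solution, solution_alt]
  -- A's fold, split into its three independent components
  have hfoldA :
      (PySem.List.enumerate A).foldl
        (fun (st : Int × PySem.Dict (List Char) Int × PySem.Dict (List Char) Int) (p : Int × Int) =>
          let acc_balance := st.1 + p.2
          if p.2 < 0 then
            let date := PySem.Chars.splitOn ((PySem.List.pyGet? D p.1).getD "").toList ['-']
            let month := (PySem.List.pyGet? date 1).getD []
            (acc_balance, st.2.1.modify month 0 (· + 1), st.2.2.modify month 0 (· + p.2))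
          else
            (acc_balance, st.2.1, st.2.2))
        (0, PySem.Dict.empty, PySem.Dict.empty)
      = (A.sum,
         (pvP A D).foldl (fun c q => c.modify q.1 0 (· + 1)) PySem.Dict.empty,
         (pvP A D).foldl (fun v q => v.modify q.1 0 (· + q.2)) PySem.Dict.empty) := by
    rw [show (fun (st : Int × PySem.Dict (List Char) Int × PySem.Dict (List Char) Int) (p : Int × Int) =>
          let acc_balance := st.1 + p.2
          if p.2 < 0 then
            let date := PySem.Chars.splitOn ((PySem.List.pyGet? D p.1).getD "").toList ['-']
            let month := (PySem.List.pyGet? date 1).getD []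
            (acc_balance, st.2.1.modify month 0 (· + 1), st.2.2.modify month 0 (· + p.2))
          else
            (acc_balance, st.2.1, st.2.2))
        = (fun (st : Int × PySem.Dict (List Char) Int × PySem.Dict (List Char) Int) (p : Int × Int) =>
            ((fun (b : Int) (p : Int × Int) => b + p.2) st.1 p,
             (fun (cv : PySem.Dict (List Char) Int × PySem.Dict (List Char) Int) (p : Int × Int) =>
               ((fun (c : PySem.Dict (List Char) Int) (p : Int × Int) =>
                   if (fun (p : Int × Int) => decide (p.2 < 0)) p = true then
                     c.modify (pvKeyA D p) 0 (· + 1) else c) cv.1 p,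
                (fun (v : PySem.Dict (List Char) Int) (p : Int × Int) =>
                   if (fun (p : Int × Int) => decide (p.2 < 0)) p = true then
                     v.modify (pvKeyA D p) 0 (· + p.2) else v) cv.2 p)) st.2 p))
        from by
          funext st p
          by_cases hp : p.2 < 0 <;> simp [hp, pvKeyA, pvKey]]
    rw [PySem.List.foldl_prod_mk (fun (b : Int) (p : Int × Int) => b + p.2)
      (fun (cv : PySem.Dict (List Char) Int × PySem.Dict (List Char) Int) (p : Int × Int) =>
        ((fun (c : PySem.Dict (List Char) Int) (p : Int × Int) =>
            if (fun (p : Int × Int) => decide (p.2 < 0)) p = true then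
              c.modify (pvKeyA D p) 0 (· + 1) else c) cv.1 p,
         (fun (v : PySem.Dict (List Char) Int) (p : Int × Int) =>
            if (fun (p : Int × Int) => decide (p.2 < 0)) p = true then
              v.modify (pvKeyA D p) 0 (· + p.2) else v) cv.2 p))
      (PySem.List.enumerate A) 0 (PySem.Dict.empty, PySem.Dict.empty),
      PySem.List.foldl_prod_mk
      (fun (c : PySem.Dict (List Char) Int) (p : Int × Int) =>
        if (fun (p : Int × Int) => decide (p.2 < 0)) p = true then
          c.modify (pvKeyA D p) 0 (· + 1) else c)
      (fun (v : PySem.Dict (List Char) Int) (p : Int × Int) =>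
        if (fun (p : Int × Int) => decide (p.2 < 0)) p = true then
          v.modify (pvKeyA D p) 0 (· + p.2) else v)
      (PySem.List.enumerate A) PySem.Dict.empty PySem.Dict.empty]
    refine Prod.ext ?_ (Prod.ext ?_ ?_)
    · simpa using pv_enum_sum A 0 0
    · show (PySem.List.enumerate A 0).foldl _ _ = _
      rw [← List.foldl_filter, ← List.foldl_map (f := fun p : Int × Int => (pvKeyA D p, p.2))
        (g := fun (c : PySem.Dict (List Char) Int) (q : List Char × Int) => c.modify q.1 0 (· + 1)),
        pv_align A D h]
    · show (PySem.List.enumerate A 0).foldl _ _ = _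
      rw [← List.foldl_filter, ← List.foldl_map (f := fun p : Int × Int => (pvKeyA D p, p.2))
        (g := fun (v : PySem.Dict (List Char) Int) (q : List Char × Int) => v.modify q.1 0 (· + q.2)),
        pv_align A D h]
  rw [hfoldA]
  set P := pvP A D with hP
  -- B's list of pairs IS pvP A D
  have hneg : ((A.zip D).filter (fun p => decide (p.1 < 0))).map
      (fun p => ((PySem.List.pyGet? (PySem.Chars.splitOn p.2.toList ['-']) 1).getD [], p.1)) = P := rfl
  rw [hneg]
  set cnt : PySem.Dict (List Char) Int := P.foldl (fun c q => c.modify q.1 0 (· + 1)) PySem.Dict.empty with hcnt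
  set val := P.foldl (fun v q => v.modify q.1 0 (· + q.2)) PySem.Dict.empty with hval
  -- the predicate both programs test on a month, as B computes it
  set pred : List Char → Bool := fun k =>
    decide (3 ≤ ((((P.filter (fun r => r.1 == k)).map (·.2)).length : Nat) : Int))
      && decide (((P.filter (fun r => r.1 == k)).map (·.2)).sum ≤ -100) with hpred
  have hndc : cnt.keys.Nodup := by
    rw [hcnt]
    exact PySem.Dict.nodup_keys_foldl_modify_key P Prod.fst (0 : Int) (fun _ _ => (· + 1))
      PySem.Dict.empty (by simp [PySem.Dict.keys_empty])
  have hgetc : ∀ k, cnt.getD k 0 = ((P.filter (fun p => p.1 == k)).length : Int) := by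
    intro k
    rw [hcnt, pv_getD_foldl_modify_count]
    simp
  have hgetv : ∀ k, val.getD k 0 = ((P.filter (fun p => p.1 == k)).map (·.2)).sum := by
    intro k
    rw [hval, pv_getD_foldl_modify_sum]
    simp
  -- A's excluded count = countP pred over cnt.keys
  rw [PySem.Dict.items_eq_map_keys cnt hndc 0, List.foldl_map, PySem.List.foldl_count_if]
  have hcntP : List.countP
      (fun k => decide (3 ≤ cnt.getD k 0) && decide (val.getD k 0 ≤ -100)) cnt.keys
      = List.countP pred cnt.keys := by
    apply List.countP_congr
    intro k _
    simp only [hpred, hgetc, hgetv, List.length_map]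
  -- B's excluded count = countP pred over pvNew [] P
  rw [show (fun (st : List (List Char) × Int) (q : List Char × Int) =>
        if st.1.contains q.1 then st
        else
          let amts := (P.filter (fun r => r.1 == q.1)).map (·.2)
          (st.1 ++ [q.1],
           if decide (3 ≤ ((amts.length : Nat) : Int)) && decide (amts.sum ≤ -100) then st.2 + 1 else st.2))
      = (fun (st : List (List Char) × Int) (q : List Char × Int) =>
          if st.1.contains q.1 then st
          else (st.1 ++ [q.1], if pred q.1 then st.2 + 1 else st.2))
      from by funext st q; rw [hpred]]
  rw [pv_foldB pred P [] 0]
  -- the two key lists are permutations: both Nodup with the same members (months of P)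
  have hkeys : cnt.keys = PySem.Set.ofList (P.map Prod.fst) := by
    rw [hcnt, PySem.Dict.keys_foldl_modify_key P Prod.fst (0 : Int) (fun _ _ => (· + 1))
      PySem.Dict.empty]
    simp [PySem.Dict.keys_empty, PySem.Set.update, PySem.Set.ofList_eq_foldl]
  have hperm : cnt.keys.Perm (pvNew [] P) := by
    rw [(List.perm_ext_iff_of_nodup hndc (by simpa using pv_nodup_pvNew [] P (by simp)))]
    intro x
    rw [hkeys, PySem.Set.mem_ofList]
    have := pv_mem_pvNew [] P x
    simpa using this.symm
  rw [hcntP, hperm.countP_eq]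

-- ===== VERDICT (by name: the statement is the Claim_ definition above) =====
theorem solution_spec : Claim_equal_solution := by
  intro A D _ hpre
  unfold Spec_solution
  exact pv_main A D (fun i hi hneg => (hpre i hi hneg).1)
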